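-- pv_equiv track=rewrite | github.com/TuTheWeeb/pyrekit-server | src/pyrekit-server/server.py | parse_route
-- ===== SOURCE A (Python) =====
-- from typing import Any, Dict, List, Tuple
--
-- def function_to_rule(name: str, prefix: str) -> str:
--     """
--     Change the _ to / in the route, so that the route can work
--     """
--
--     path = name[len(prefix) :]
--
--     return f"/{path.replace('_', '/')}"
--
-- def parse_route(name: str) -> Tuple[str | None, str]:
--     """
--     Parse the route from the method name
--     """
--
--     HTTP_PREFIX_MAP = {
--         "GET_": "GET",
--         "POST_": "POST",
--         "PUT_": "PUT",
--         "DELETE_": "DELETE",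
--     }
--
--     for prefix, method in HTTP_PREFIX_MAP.items():
--         if name.startswith(prefix):
--             return method, function_to_rule(name, prefix)
--     return None, ""
-- ===== SOURCE B (Python) =====
-- def parse_route(name):
--     """Parse the route from the method name: split once at the first '_'."""
--     method, sep, rest = name.partition('_')
--     if sep and method in {"GET", "POST", "PUT", "DELETE"}:
--         return method, '/' + rest.replace('_', '/')
--     return None, ''
-- ===== Notes on version B (the rewrite author's own statement) =====
-- stated objective: simpler
-- what changed: Replaces the loop of four startswith checks (each followed by re-slicing the name) with a single partition at the first underscore plus one set-membership test on the method.
import Mathlib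
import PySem

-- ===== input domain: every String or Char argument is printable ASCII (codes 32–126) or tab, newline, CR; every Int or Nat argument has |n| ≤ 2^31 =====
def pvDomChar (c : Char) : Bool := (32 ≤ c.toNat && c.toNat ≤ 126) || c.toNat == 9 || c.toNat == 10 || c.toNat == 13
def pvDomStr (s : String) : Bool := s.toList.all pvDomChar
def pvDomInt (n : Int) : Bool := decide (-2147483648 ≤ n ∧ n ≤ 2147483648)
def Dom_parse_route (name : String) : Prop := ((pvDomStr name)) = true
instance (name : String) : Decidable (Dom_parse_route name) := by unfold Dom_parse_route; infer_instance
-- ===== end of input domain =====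

-- B replaces A's loop of four startswith checks by a single partition at the first '_' plus one set-membership test (objective: simpler).

-- ===== PORT A =====
def function_to_rule (name : String) (pfx : String) : String :=
  let path := PySem.Str.slice name (some (PySem.Str.len pfx)) none
  "/" ++ PySem.Str.replace path "_" "/"

def parse_route_go (name : String) : List (String × String) → Option String × String
  | [] => (none, "")
  | (pfx, method) :: rest =>
      if PySem.Str.startswith name pfx then (some method, function_to_rule name pfx)
      else parse_route_go name rest

def parse_route (name : String) : Option String × String :=
  parse_route_go name ((((((PySem.Dict.empty : PySem.Dict String String).insert "GET_" "GET").insert "POST_" "POST").insert "PUT_" "PUT").insert "DELETE_" "DELETE").items)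

-- ===== PORT B =====
-- name.partition('_') on the character list: (head, separator-found?, tail)
def partChars : List Char → List Char × Bool × List Char
  | [] => ([], false, [])
  | c :: cs =>
      if c = '_' then ([], true, cs)
      else
        let r := partChars cs
        (c :: r.1, r.2.1, r.2.2)

def parse_route_alt (name : String) : Option String × String :=
  let r := partChars name.toList
  let method := String.ofList r.1
  if r.2.1 && (method == "GET" || method == "POST" || method == "PUT" || method == "DELETE") then
    (some method, String.ofList ('/' :: PySem.Chars.replace r.2.2 ['_'] ['/']))
  else (none, "")

-- ===== PRECONDITION & SPEC =====
def Spec_parse_route (name : String) (out : Option String × String) : Prop := out = parse_route_alt name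
instance (name : String) (out : Option String × String) : Decidable (Spec_parse_route name out) := by unfold Spec_parse_route; infer_instance

-- ===== CLAIM (what is proved, stated in full; the proofs are below) =====
def Claim_equal_parse_route : Prop := ∀ (name : String), Dom_parse_route name → Spec_parse_route name (parse_route name)

-- ===== LEMMAS AND PROOFS =====

-- partition of p ++ '_' :: t when p has no underscore
theorem partChars_split (p t : List Char) (hp : '_' ∉ p) :
    partChars (p ++ '_' :: t) = (p, true, t) := by
  induction p with
  | nil => simp [partChars]
  | cons c cs ih =>
      simp only [List.mem_cons, not_or] at hp
      simp [partChars, Ne.symm hp.1, ih hp.2]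

-- soundness: a found separator decomposes the input
theorem partChars_found (s h t : List Char) (hs : partChars s = (h, true, t)) :
    s = h ++ '_' :: t := by
  induction s generalizing h t with
  | nil => simp [partChars] at hs
  | cons c cs ih =>
      by_cases hc : c = '_'
      · subst hc
        simp only [partChars, if_pos] at hs
        obtain ⟨rfl, -, rfl⟩ := hs
        simp
      · rcases hr : partChars cs with ⟨h', f', t'⟩
        simp only [partChars, if_neg hc, hr, Prod.mk.injEq] at hs
        obtain ⟨rfl, hf, rfl⟩ := hs
        have := ih h' t' (by rw [hr, hf])
        simp [this]

-- the matching branch: when name = m ++ '_' :: t with '_' ∉ m and m names a method,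
-- B returns m together with A's function_to_rule value
theorem pos_case (name : String) (m t : List Char) (hm : '_' ∉ m)
    (hmeth : (String.ofList m == "GET" || String.ofList m == "POST" ||
              String.ofList m == "PUT" || String.ofList m == "DELETE") = true)
    (hlist : name.toList = m ++ '_' :: t) :
    parse_route_alt name = (some (String.ofList m), function_to_rule name (String.ofList (m ++ ['_']))) := by
  have hpart : partChars name.toList = (m, true, t) := by rw [hlist]; exact partChars_split m t hm
  simp only [parse_route_alt, hpart, Bool.true_and, hmeth, if_pos]
  refine Prod.ext rfl ?_
  apply String.toList_inj.mp
  have hlen : PySem.Str.len (String.ofList (m ++ ['_'])) = ((m.length + 1 : Nat) : Int) := by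
    simp [PySem.Str.len_eq]
  have hdrop : name.toList.drop (m.length + 1) = t := by
    rw [hlist, show m ++ '_' :: t = (m ++ ['_']) ++ t by simp, show m.length + 1 = (m ++ ['_']).length by simp]; simp
  simp only [function_to_rule, hlen, String.toList_append, PySem.Str.toList_replace,
    PySem.Str.toList_slice, PySem.Chars.slice_eq_listSlice,
    PySem.List.slice_from _ (Int.natCast_nonneg _)]
  simp [hdrop]

theorem not_pre_of_not_start (name : String) (p : String)
    (h : ¬ PySem.Str.startswith name p = true) : ¬ p.toList <+: name.toList := by
  rw [PySem.Str.startswith_eq] at h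
  exact fun hc => h ((PySem.Chars.startswith_iff _ _).mpr hc)

theorem start_decomp (name : String) (p : String)
    (h : PySem.Str.startswith name p = true) :
    name.toList = p.toList ++ name.toList.drop p.toList.length := by
  obtain ⟨t, ht⟩ := (PySem.Chars.startswith_iff _ _).mp
    (by rw [← PySem.Str.startswith_eq]; exact h)
  rw [← ht]; simp

-- ===== VERDICT (by name: the statement is the Claim_ definition above) =====
theorem parse_route_spec : Claim_equal_parse_route := by
  intro name _
  show parse_route name = parse_route_alt name
  have hitems : ((((((PySem.Dict.empty : PySem.Dict String String).insert "GET_" "GET").insert "POST_" "POST").insert "PUT_" "PUT").insert "DELETE_" "DELETE").items)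
      = [("GET_", "GET"), ("POST_", "POST"), ("PUT_", "PUT"), ("DELETE_", "DELETE")] := by decide
  rw [parse_route, hitems]
  by_cases h1 : PySem.Str.startswith name "GET_" = true
  · have hd := start_decomp name "GET_" h1
    rw [pos_case name ['G','E','T'] (name.toList.drop 4) (by decide) (by decide) (by simpa using hd)]
    rw [show String.ofList ['G','E','T'] = "GET" from by decide,
       show String.ofList (['G','E','T'] ++ ['_']) = "GET_" from by decide]
    simp only [PySem.Str.startswith_eq] at h1
    simp at h1
    simp [parse_route_go, h1]
  by_cases h2 : PySem.Str.startswith name "POST_" = true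
  · have hd := start_decomp name "POST_" h2
    rw [pos_case name ['P','O','S','T'] (name.toList.drop 5) (by decide) (by decide) (by simpa using hd)]
    rw [show String.ofList ['P','O','S','T'] = "POST" from by decide,
       show String.ofList (['P','O','S','T'] ++ ['_']) = "POST_" from by decide]
    simp only [PySem.Str.startswith_eq] at h1 h2
    simp at h1 h2
    simp [parse_route_go, h1, h2]
  by_cases h3 : PySem.Str.startswith name "PUT_" = true
  · have hd := start_decomp name "PUT_" h3
    rw [pos_case name ['P','U','T'] (name.toList.drop 4) (by decide) (by decide) (by simpa using hd)]
    rw [show String.ofList ['P','U','T'] = "PUT" from by decide,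
       show String.ofList (['P','U','T'] ++ ['_']) = "PUT_" from by decide]
    simp only [PySem.Str.startswith_eq] at h1 h2 h3
    simp at h1 h2 h3
    simp [parse_route_go, h1, h2, h3]
  by_cases h4 : PySem.Str.startswith name "DELETE_" = true
  · have hd := start_decomp name "DELETE_" h4
    rw [pos_case name ['D','E','L','E','T','E'] (name.toList.drop 7) (by decide) (by decide) (by simpa using hd)]
    rw [show String.ofList ['D','E','L','E','T','E'] = "DELETE" from by decide,
       show String.ofList (['D','E','L','E','T','E'] ++ ['_']) = "DELETE_" from by decide]
    simp only [PySem.Str.startswith_eq] at h1 h2 h3 h4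
    simp at h1 h2 h3 h4
    simp [parse_route_go, h1, h2, h3, h4]
  -- no prefix matches: B also takes its else branch
  simp only [parse_route_go, h1, h2, h3, h4, if_neg, Bool.false_eq_true, not_false_eq_true,
    parse_route_alt]
  rcases hE : partChars name.toList with ⟨h, found, t⟩
  cases found with
  | false => simp
  | true =>
      have hdec := partChars_found _ _ _ hE
      have hne : ¬ ((true && (String.ofList h == "GET" || String.ofList h == "POST" ||
          String.ofList h == "PUT" || String.ofList h == "DELETE")) = true) := by
        simp only [Bool.true_and, Bool.or_eq_true, beq_iff_eq]
        rintro (((hmk|hmk)|hmk)|hmk)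
        · refine not_pre_of_not_start name "GET_" h1 ?_
          have hh : h = ['G','E','T'] := by simpa using congrArg String.toList hmk
          subst hh; rw [hdec]; exact ⟨t, by simp⟩
        · refine not_pre_of_not_start name "POST_" h2 ?_
          have hh : h = ['P','O','S','T'] := by simpa using congrArg String.toList hmk
          subst hh; rw [hdec]; exact ⟨t, by simp⟩
        · refine not_pre_of_not_start name "PUT_" h3 ?_
          have hh : h = ['P','U','T'] := by simpa using congrArg String.toList hmk
          subst hh; rw [hdec]; exact ⟨t, by simp⟩
        · refine not_pre_of_not_start name "DELETE_" h4 ?_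
          have hh : h = ['D','E','L','E','T','E'] := by simpa using congrArg String.toList hmk
          subst hh; rw [hdec]; exact ⟨t, by simp⟩
      simp [hne]
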